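-- pv_equiv track=rewrite | github.com/R21Digital/Project-MorningStar | src/quest_selector.py | _filter_quests
-- ===== SOURCE A (Python) =====
-- from typing import Optional, Any, Dict, List
--
-- def _filter_quests(quests: List[dict], planet: str | None, quest_type: str | None) -> List[dict]:
--     """Return quests matching the provided filters."""
--     results = quests
--     if planet:
--         planet = planet.lower()
--         results = [q for q in results if planet in q.get("planet", "").lower()]
--     if quest_type:
--         qtype = quest_type.lower()
--         results = [q for q in results if qtype in q.get("type", "").lower()]
--     return results
-- ===== SOURCE B (Python) =====
-- def _filter_quests(quests, planet, quest_type):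
--     """Return quests matching the provided filters (single combined pass)."""
--     p = planet.lower() if planet else None
--     t = quest_type.lower() if quest_type else None
--     if p is None and t is None:
--         return quests
--     out = []
--     for q in quests:
--         if p is not None and p not in q.get("planet", "").lower():
--             continue
--         if t is not None and t not in q.get("type", "").lower():
--             continue
--         out.append(q)
--     return out
-- ===== Notes on version B (the rewrite author's own statement) =====
-- stated objective: simpler
-- what changed: Replaces A's two sequential list-rebuilding comprehensions with one combined pass: lowercase each active filter once, then a single loop appends a quest only if it passes every active substring test (returning the input unchanged when no filter is active).
import Mathlib
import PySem

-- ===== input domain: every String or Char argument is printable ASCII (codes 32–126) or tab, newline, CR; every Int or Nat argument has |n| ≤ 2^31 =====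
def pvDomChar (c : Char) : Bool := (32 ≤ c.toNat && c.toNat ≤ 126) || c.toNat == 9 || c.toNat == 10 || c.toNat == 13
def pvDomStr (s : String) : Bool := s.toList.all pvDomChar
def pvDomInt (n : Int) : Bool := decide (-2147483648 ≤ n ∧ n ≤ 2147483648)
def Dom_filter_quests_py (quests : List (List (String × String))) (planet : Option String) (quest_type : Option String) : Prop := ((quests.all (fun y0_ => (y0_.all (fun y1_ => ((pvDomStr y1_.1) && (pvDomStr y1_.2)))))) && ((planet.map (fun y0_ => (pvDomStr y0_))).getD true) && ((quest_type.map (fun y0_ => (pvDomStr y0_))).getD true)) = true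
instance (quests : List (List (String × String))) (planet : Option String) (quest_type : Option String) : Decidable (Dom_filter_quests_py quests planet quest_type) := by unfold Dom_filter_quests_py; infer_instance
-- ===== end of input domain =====

-- B merges A's two sequential filtering comprehensions into one combined pass (objective: simpler); same results.
-- ===== PORT A =====
-- q.get(k, "") on the quest dict (association list, first match)
def pvQGet (q : List (String × String)) (k : String) : String :=
  (PySem.Dict.mk q).getD k ""

def filter_quests_py (quests : List (List (String × String))) (planet : Option String) (quest_type : Option String) : List (List (String × String)) :=
  let results := quests
  let results :=
    match planet with
    | none => results
    | some pl =>
      if pl.toList = [] then results   -- falsy string: filter skipped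
      else results.filter (fun q => PySem.Str.isIn (PySem.Str.lower pl) (PySem.Str.lower (pvQGet q "planet")))
  let results :=
    match quest_type with
    | none => results
    | some qt =>
      if qt.toList = [] then results
      else results.filter (fun q => PySem.Str.isIn (PySem.Str.lower qt) (PySem.Str.lower (pvQGet q "type")))
  results

-- ===== PORT B =====
-- one quest passes every active lowered filter
def pvPasses (p t : Option String) (q : List (String × String)) : Bool :=
  (match p with
   | some ps => PySem.Str.isIn ps (PySem.Str.lower (pvQGet q "planet"))
   | none => true) &&
  (match t with
   | some ts => PySem.Str.isIn ts (PySem.Str.lower (pvQGet q "type"))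
   | none => true)

def filter_quests_py_alt (quests : List (List (String × String))) (planet : Option String) (quest_type : Option String) : List (List (String × String)) :=
  let p : Option String :=
    match planet with
    | some s => if s.toList = [] then none else some (PySem.Str.lower s)
    | none => none
  let t : Option String :=
    match quest_type with
    | some s => if s.toList = [] then none else some (PySem.Str.lower s)
    | none => none
  match p, t with
  | none, none => quests
  | p, t => quests.foldl (fun acc q => if pvPasses p t q then acc ++ [q] else acc) []

-- ===== PRECONDITION & SPEC =====
def Spec_filter_quests_py (quests : List (List (String × String))) (planet : Option String) (quest_type : Option String) (out : List (List (String × String))) : Prop := out = filter_quests_py_alt quests planet quest_type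
instance (quests : List (List (String × String))) (planet : Option String) (quest_type : Option String) (out : List (List (String × String))) : Decidable (Spec_filter_quests_py quests planet quest_type out) := by unfold Spec_filter_quests_py; infer_instance

-- ===== CLAIM (what is proved, stated in full; the proofs are below) =====
def Claim_equal_filter_quests_py : Prop := ∀ (quests : List (List (String × String))) (planet : Option String) (quest_type : Option String), Dom_filter_quests_py quests planet quest_type → Spec_filter_quests_py quests planet quest_type (filter_quests_py quests planet quest_type)

-- ===== LEMMAS AND PROOFS =====

-- ===== VERDICT (by name: the statement is the Claim_ definition above) =====
theorem filter_quests_py_spec : Claim_equal_filter_quests_py := by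
  intro quests planet quest_type _
  unfold Spec_filter_quests_py filter_quests_py filter_quests_py_alt
  cases planet with
  | none =>
    cases quest_type with
    | none => simp
    | some qt =>
      by_cases h : qt.toList = [] <;>
        simp [h, PySem.List.foldl_append_if_eq_filter, pvPasses]
  | some pl =>
    cases quest_type with
    | none =>
      by_cases h : pl.toList = [] <;>
        simp [h, PySem.List.foldl_append_if_eq_filter, pvPasses]
    | some qt =>
      by_cases h1 : pl.toList = [] <;> by_cases h2 : qt.toList = [] <;>
        simp [h1, h2, PySem.List.foldl_append_ite_eq_filter, pvPasses, List.filter_filter,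
              Bool.and_comm]
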